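-- pv_equiv track=rewrite | github.com/RafaelPignatari/RSA | Simple_tcpServer.py | criptografa
-- ===== SOURCE A (Python) =====
-- import math
--
-- def primos_entre_si(totient):
--     e = 2
--     while math.gcd(e, totient) != 1:
--         e += 1
--     return e
--
-- def multiplicaInverso(e, phi):
--     def extended_gcd(a, b):
--         if a == 0:
--             return (b, 0, 1)
--         else:
--             g, x, y = extended_gcd(b % a, a)
--             return (g, y - (b // a) * x, x)
--
--     _, x, _ = extended_gcd(e, phi)
--     return x % phi
--
-- def funcaoTotiente(p, q):
--     return (p-1) * (q-1)
--
-- def criptografa(frase, p, q, ):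
--     N = p * q
--     m = funcaoTotiente(p, q)
--     e = primos_entre_si(m)
--
--     D = multiplicaInverso(e, m)
--
--     # Converte a frase em uma lista de inteiros usando a função ord
--     frase_inteiros = [ord(char) for char in frase]
--
--     # Criptografa cada caractere da frase
--     frase_criptografada = [pow(i, e, N) for i in frase_inteiros]
--     return frase_criptografada, N, D
-- ===== SOURCE B (Python) =====
-- import math
--
-- def criptografa(frase, p, q, ):
--     N = p * q
--     phi = (p - 1) * (q - 1)
--     e = 2
--     while math.gcd(e, phi) != 1:
--         e += 1
--
--     # modular inverse of e mod phi, by the ITERATIVE extended Euclidean algorithm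
--     old_r, r = e, phi
--     old_s, s = 1, 0
--     while r != 0:
--         quot = old_r // r
--         old_r, r = r, old_r - quot * r
--         old_s, s = s, old_s - quot * s
--     if old_r < 0:          # normalise the gcd to be non-negative
--         old_s = -old_s
--     D = old_s % phi
--
--     # encrypt each character by square-and-multiply modular exponentiation
--     cifra = []
--     for ch in frase:
--         c, base, k = 1, ord(ch) % N, e
--         while k > 0:
--             if k % 2 == 1:
--                 c = (c * base) % N
--             base = (base * base) % N
--             k //= 2
--         cifra.append(c)
--     return cifra, N, D
-- ===== Notes on version B (the rewrite author's own statement) =====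
-- stated objective: alternative
-- what changed: The recursive extended_gcd helper is replaced by an iterative extended-Euclid loop maintaining Bezout coefficients (with gcd-sign normalisation), and the per-character builtin pow(i, e, N) is replaced by an explicit square-and-multiply modular-exponentiation loop that keeps every intermediate reduced mod N.
import Mathlib
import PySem

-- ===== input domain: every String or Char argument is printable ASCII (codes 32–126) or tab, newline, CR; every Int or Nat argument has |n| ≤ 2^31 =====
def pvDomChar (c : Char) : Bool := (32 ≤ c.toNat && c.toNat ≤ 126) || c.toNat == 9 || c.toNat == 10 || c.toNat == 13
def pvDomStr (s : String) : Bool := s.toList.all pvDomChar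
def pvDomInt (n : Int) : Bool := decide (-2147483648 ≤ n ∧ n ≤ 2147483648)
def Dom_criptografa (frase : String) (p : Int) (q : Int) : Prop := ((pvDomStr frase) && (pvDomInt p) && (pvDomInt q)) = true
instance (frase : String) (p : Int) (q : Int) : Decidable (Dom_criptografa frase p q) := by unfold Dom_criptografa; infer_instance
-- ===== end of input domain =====

-- B replaces the recursive extended_gcd by an iterative extended-Euclid loop (with gcd-sign
-- normalisation) and the builtin pow(i, e, N) by an explicit square-and-multiply loop; same results.

-- Termination facts cited by the recursive ports below (decreasing_by).
theorem pvModNatAbsLt (a : Int) (ha : a ≠ 0) (b : Int) : (PySem.Int.mod b a).natAbs < a.natAbs := by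
  rcases lt_or_gt_of_ne ha with hneg | hpos
  · have := PySem.Int.mod_neg_bounds b hneg
    omega
  · have h1 := PySem.Int.mod_nonneg b hpos
    have h2 := PySem.Int.mod_lt b hpos
    omega

theorem pvSubFloordivMul (a b : Int) : a - PySem.Int.floordiv a b * b = PySem.Int.mod a b := by
  have := PySem.Int.floordiv_mul_add_mod a b
  omega

-- ===== PORT A =====
-- while math.gcd(e, totient) != 1: e += 1   (fuel totient.natAbs + 2 is enough: gcd(|m|+1, m) = 1)
def pvGcdLoop : Nat → Int → Int → Int
  | 0, e, _ => e
  | f + 1, e, m => if Int.gcd e m ≠ 1 then pvGcdLoop f (e + 1) m else e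

def primos_entre_si (totient : Int) : Int := pvGcdLoop (totient.natAbs + 2) 2 totient

-- def extended_gcd(a, b): recursive, exactly A's recursion
def pvExtendedGcd (a b : Int) : Int × Int × Int :=
  if h : a = 0 then (b, 0, 1)
  else
    let r := pvExtendedGcd (PySem.Int.mod b a) a
    (r.1, r.2.2 - PySem.Int.floordiv b a * r.2.1, r.2.1)
termination_by a.natAbs
decreasing_by exact pvModNatAbsLt a h b

def multiplicaInverso (e phi : Int) : Int := PySem.Int.mod (pvExtendedGcd e phi).2.1 phi

def funcaoTotiente (p q : Int) : Int := (p - 1) * (q - 1)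

def criptografa (frase : String) (p : Int) (q : Int) : List Int × Int × Int :=
  let N := p * q
  let m := funcaoTotiente p q
  let e := primos_entre_si m
  let D := multiplicaInverso e m
  let frase_inteiros := frase.toList.map (fun ch => (ch.toNat : Int))
  let frase_criptografada := frase_inteiros.map (fun i => PySem.Int.powMod i e.toNat N)
  (frase_criptografada, N, D)

-- ===== PORT B =====
-- the iterative extended-Euclid loop: returns (old_r, old_s) when r = 0
def pvEuclidLoop (oldr r olds s : Int) : Int × Int :=
  if h : r = 0 then (oldr, olds)
  else
    pvEuclidLoop r (oldr - PySem.Int.floordiv oldr r * r) s (olds - PySem.Int.floordiv oldr r * s)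
termination_by r.natAbs
decreasing_by rw [pvSubFloordivMul]; exact pvModNatAbsLt r h oldr

-- the square-and-multiply loop:  while k > 0: if k % 2 == 1: c = c*base % N; base = base*base % N; k //= 2
def pvBinPow (N c base k : Int) : Int :=
  if h : 0 < k then
    pvBinPow N (if PySem.Int.mod k 2 = 1 then PySem.Int.mod (c * base) N else c)
      (PySem.Int.mod (base * base) N) (PySem.Int.floordiv k 2)
  else c
termination_by k.toNat
decreasing_by
  rw [PySem.Int.floordiv_eq_ediv_of_pos (by norm_num)]
  omega

def criptografa_alt (frase : String) (p : Int) (q : Int) : List Int × Int × Int :=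
  let N := p * q
  let phi := (p - 1) * (q - 1)
  let e := pvGcdLoop (phi.natAbs + 2) 2 phi
  let gs := pvEuclidLoop e phi 1 0
  let D := PySem.Int.mod (if gs.1 < 0 then -gs.2 else gs.2) phi
  let cifra := frase.toList.map (fun ch => pvBinPow N 1 (PySem.Int.mod (ch.toNat : Int) N) e)
  (cifra, N, D)

-- ===== PRECONDITION & SPEC =====
-- Pre_ excludes only non-returning inputs: p = 1 or q = 1 makes the totient 0 and A's e-search
-- while-loop diverge; p*q = 0 with a non-empty frase makes pow(i, e, 0) raise ValueError
-- (and ord(ch) % 0 raise in B); with frase = "" no pow is evaluated and both return.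
def Pre_criptografa (frase : String) (p : Int) (q : Int) : Prop := p ≠ 1 ∧ q ≠ 1 ∧ (frase = "" ∨ p * q ≠ 0)
instance (frase : String) (p : Int) (q : Int) : Decidable (Pre_criptografa frase p q) := by unfold Pre_criptografa; infer_instance

def pvWitness_criptografa : String × Int × Int := ("Oi!", 5, 11)

def Spec_criptografa (frase : String) (p : Int) (q : Int) (out : List Int × Int × Int) : Prop := out = criptografa_alt frase p q
instance (frase : String) (p : Int) (q : Int) (out : List Int × Int × Int) : Decidable (Spec_criptografa frase p q out) := by unfold Spec_criptografa; infer_instance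

-- ===== CLAIM (what is proved, stated in full; the proofs are below) =====
def Claim_equal_criptografa : Prop := ∀ (frase : String) (p : Int) (q : Int), Dom_criptografa frase p q → Pre_criptografa frase p q → Spec_criptografa frase p q (criptografa frase p q)

-- ===== LEMMAS AND PROOFS =====

-- Python's a % n is canonical in its residue class: congruent numbers have equal mod.
theorem pvModCongr (n x y : Int) (hn : n ≠ 0) (h : n ∣ x - y) :
    PySem.Int.mod x n = PySem.Int.mod y n := by
  have hx := PySem.Int.floordiv_mul_add_mod x n
  have hy := PySem.Int.floordiv_mul_add_mod y n
  have hd : n ∣ (PySem.Int.mod x n - PySem.Int.mod y n) := by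
    obtain ⟨k, hk⟩ := h
    exact ⟨k - PySem.Int.floordiv x n + PySem.Int.floordiv y n, by linarith [hx, hy]⟩
  have hd' : |n| ∣ (PySem.Int.mod x n - PySem.Int.mod y n) := (abs_dvd _ _).2 hd
  have hz : PySem.Int.mod x n - PySem.Int.mod y n = 0 := by
    apply Int.eq_zero_of_abs_lt_dvd hd'
    rcases lt_or_gt_of_ne hn with hneg | hpos
    · have b1 := PySem.Int.mod_neg_bounds x hneg
      have b2 := PySem.Int.mod_neg_bounds y hneg
      rw [abs_lt, abs_of_neg hneg]; omega
    · have b1 := PySem.Int.mod_nonneg x hpos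
      have b2 := PySem.Int.mod_lt x hpos
      have b3 := PySem.Int.mod_nonneg y hpos
      have b4 := PySem.Int.mod_lt y hpos
      rw [abs_lt, abs_of_pos hpos]; omega
  omega

theorem pvModDvdSub (a n : Int) : n ∣ a - PySem.Int.mod a n := by
  have h := PySem.Int.floordiv_mul_add_mod a n
  have h2 : a - PySem.Int.mod a n = PySem.Int.floordiv a n * n := by omega
  exact h2 ▸ dvd_mul_left n (PySem.Int.floordiv a n)

theorem pvModModEq (a N : Int) : PySem.Int.mod a N ≡ a [ZMOD N] :=
  (Int.modEq_iff_dvd).2 (pvModDvdSub a N)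

-- One Euclid step keeps the gcd.
theorem pvGcdStep (a b : Int) : Int.gcd (PySem.Int.mod b a) a = Int.gcd a b := by
  have hmb : PySem.Int.mod b a = b + (-(PySem.Int.floordiv b a)) * a := by
    have := PySem.Int.floordiv_mul_add_mod b a
    ring_nf
    omega
  rw [Int.gcd_comm, hmb, Int.gcd_add_mul_right_right]

theorem pvGcdLoop_ge (f : Nat) (e m : Int) : e ≤ pvGcdLoop f e m := by
  induction f generalizing e with
  | zero => simp [pvGcdLoop]
  | succ f ih =>
    simp only [pvGcdLoop]
    split
    · exact le_trans (by omega) (ih (e + 1))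
    · exact le_refl e

theorem pvGcdLoop_coprime (f : Nat) (e m : Int)
    (hw : ∃ k : Nat, k < f ∧ Int.gcd (e + k) m = 1) :
    Int.gcd (pvGcdLoop f e m) m = 1 := by
  induction f generalizing e with
  | zero => omega
  | succ f ih =>
    simp only [pvGcdLoop]
    split
    · rename_i hne
      apply ih
      obtain ⟨k, hk, hg⟩ := hw
      have hk0 : k ≠ 0 := by
        intro h0
        exact hne (by simpa [h0] using hg)
      exact ⟨k - 1, by omega, by rw [show e + 1 + (↑(k - 1) : Int) = e + k by push_cast; omega]; exact hg⟩
    · simpa using by rename_i hne; exact not_not.mp (by simpa using hne)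

theorem pvE_coprime (m : Int) (hm : m ≠ 0) : Int.gcd (primos_entre_si m) m = 1 := by
  apply pvGcdLoop_coprime
  obtain ⟨n, hn⟩ : ∃ n, m.natAbs = n + 1 := ⟨m.natAbs - 1, by omega⟩
  refine ⟨n, by omega, ?_⟩
  have h1 : (2 : Int) + (n : Int) = ((n + 2 : Nat) : Int) := by push_cast; ring
  rw [h1]
  have h2 : Int.gcd ((n + 2 : Nat) : Int) m = Nat.gcd (n + 2) (n + 1) := by
    simp only [Int.gcd, hn]
    norm_cast
  rw [h2, Nat.gcd_comm, show n + 2 = 1 + (n + 1) from by omega, Nat.gcd_add_self_right,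
    Nat.gcd_one_right]

-- Bézout identity for A's recursive extended_gcd.
theorem pvExtendedGcd_bezout (a b : Int) :
    a * (pvExtendedGcd a b).2.1 + b * (pvExtendedGcd a b).2.2 = (pvExtendedGcd a b).1 := by
  induction a, b using pvExtendedGcd.induct with
  | case1 b => simp [pvExtendedGcd]
  | case2 a b h ih =>
    rw [pvExtendedGcd]
    simp only [dif_neg h]
    have hfd := PySem.Int.floordiv_mul_add_mod b a
    linear_combination ih - (pvExtendedGcd (PySem.Int.mod b a) a).2.1 * hfd

-- On non-negative arguments the returned g is the (non-negative) gcd.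
theorem pvExtendedGcd_g (a b : Int) (ha : 0 ≤ a) (hb : 0 ≤ b) :
    0 ≤ (pvExtendedGcd a b).1 ∧ (pvExtendedGcd a b).1.natAbs = Int.gcd a b := by
  induction a, b using pvExtendedGcd.induct with
  | case1 b => simpa [pvExtendedGcd] using hb
  | case2 a b h ih =>
    have ha' : 0 < a := lt_of_le_of_ne ha (Ne.symm h)
    have hm : 0 ≤ PySem.Int.mod b a := PySem.Int.mod_nonneg b ha'
    obtain ⟨h1, h2⟩ := ih hm ha
    rw [pvExtendedGcd]
    simp only [dif_neg h]
    exact ⟨h1, by rw [h2, pvGcdStep]⟩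

theorem pvExtendedGcd_g_top (e phi : Int) (he : 2 ≤ e) :
    0 ≤ (pvExtendedGcd e phi).1 ∧ (pvExtendedGcd e phi).1.natAbs = Int.gcd e phi := by
  have h : e ≠ 0 := by omega
  have he' : (0:Int) < e := by omega
  rw [pvExtendedGcd]
  simp only [dif_neg h]
  obtain ⟨h1, h2⟩ := pvExtendedGcd_g (PySem.Int.mod phi e) e (PySem.Int.mod_nonneg phi he') (by omega)
  exact ⟨h1, by rw [h2, pvGcdStep]⟩

-- A's x is an inverse of e mod phi when gcd(e, phi) = 1.
theorem pvA_inverse (e phi : Int) (he : 2 ≤ e) (hcop : Int.gcd e phi = 1) :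
    phi ∣ e * (pvExtendedGcd e phi).2.1 - 1 := by
  obtain ⟨h1, h2⟩ := pvExtendedGcd_g_top e phi he
  have hg : (pvExtendedGcd e phi).1 = 1 := by
    rw [hcop] at h2; omega
  have hb := pvExtendedGcd_bezout e phi
  rw [hg] at hb
  exact ⟨-(pvExtendedGcd e phi).2.2, by linarith⟩

-- B's loop invariant: Bézout residue and gcd preservation.
theorem pvEuclidLoop_invariant (e phi : Int) (oldr r olds s : Int)
    (h1 : phi ∣ e * olds - oldr) (h2 : phi ∣ e * s - r)
    (h3 : Int.gcd oldr r = Int.gcd e phi) :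
    phi ∣ e * (pvEuclidLoop oldr r olds s).2 - (pvEuclidLoop oldr r olds s).1 ∧
      (pvEuclidLoop oldr r olds s).1.natAbs = Int.gcd e phi := by
  induction oldr, r, olds, s using pvEuclidLoop.induct with
  | case1 oldr olds =>
    rw [pvEuclidLoop]
    exact ⟨h1, by simpa using h3⟩
  | case2 oldr r olds s h ih =>
    rw [pvEuclidLoop]
    simp only [dif_neg h]
    apply ih h2
    · obtain ⟨u, hu⟩ := h1
      obtain ⟨v, hv⟩ := h2
      exact ⟨u - PySem.Int.floordiv oldr r * v, by
        linear_combination hu - PySem.Int.floordiv oldr r * hv⟩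
    · rw [show oldr - PySem.Int.floordiv oldr r * r = PySem.Int.mod oldr r from by
        have := PySem.Int.floordiv_mul_add_mod oldr r; omega]
      rw [Int.gcd_comm, pvGcdStep, Int.gcd_comm]
      exact h3

-- B's normalised coefficient is an inverse of e mod phi when gcd(e, phi) = 1.
theorem pvB_inverse (e phi : Int) (hcop : Int.gcd e phi = 1) :
    phi ∣ e * (if (pvEuclidLoop e phi 1 0).1 < 0 then -(pvEuclidLoop e phi 1 0).2 else (pvEuclidLoop e phi 1 0).2) - 1 := by
  obtain ⟨hd, hg⟩ := pvEuclidLoop_invariant e phi e phi 1 0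
    ⟨0, by ring⟩ ⟨-1, by ring⟩ rfl
  rw [hcop] at hg
  rcases lt_or_ge (pvEuclidLoop e phi 1 0).1 0 with hneg | hpos
  · have h1 : (pvEuclidLoop e phi 1 0).1 = -1 := by omega
    rw [if_pos hneg]
    obtain ⟨u, hu⟩ := hd
    exact ⟨-u, by rw [h1] at hu; linarith⟩
  · have h1 : (pvEuclidLoop e phi 1 0).1 = 1 := by omega
    rw [if_neg (not_lt.mpr hpos)]
    rw [h1] at hd
    exact hd

-- Two inverses of e mod phi agree mod phi.
theorem pvInverse_unique (e phi x y : Int) (hcop : Int.gcd e phi = 1)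
    (hx : phi ∣ e * x - 1) (hy : phi ∣ e * y - 1) (hphi : phi ≠ 0) :
    PySem.Int.mod x phi = PySem.Int.mod y phi := by
  apply pvModCongr phi x y hphi
  have hco : IsCoprime phi e := by
    rw [Int.isCoprime_iff_gcd_eq_one, Int.gcd_comm]
    exact hcop
  apply hco.dvd_of_dvd_mul_left
  have h : e * (x - y) = (e * x - 1) - (e * y - 1) := by ring
  rw [mul_comm e (x - y)] at h
  exact (mul_comm (x - y) e) ▸ (h ▸ dvd_sub hx hy)

-- The square-and-multiply loop computes the canonical residue of c * base^n mod N.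
theorem pvBinPow_eq (N : Int) (hN : N ≠ 0) (n : Nat) (hn : 1 ≤ n) (c base : Int) :
    pvBinPow N c base (n : Int) = PySem.Int.mod (c * base ^ n) N := by
  induction n using Nat.strong_induction_on generalizing c base with
  | _ n ih =>
  rw [pvBinPow]
  have hpos : (0:Int) < (n:Int) := by exact_mod_cast hn
  rw [dif_pos hpos]
  have hfd : PySem.Int.floordiv (n : Int) 2 = ((n / 2 : Nat) : Int) := by
    exact_mod_cast PySem.Int.floordiv_natCast n 2
  have hmd : PySem.Int.mod (n : Int) 2 = ((n % 2 : Nat) : Int) := by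
    exact_mod_cast PySem.Int.mod_natCast n 2
  by_cases h2 : n = 1
  · subst h2
    rw [hfd]
    norm_num [hmd]
    rw [pvBinPow]
    norm_num
  · have hge : 2 ≤ n := by omega
    have hhalf : 1 ≤ n / 2 := by omega
    have hlt : n / 2 < n := by omega
    rw [hfd, ih (n / 2) hlt hhalf]
    apply pvModCongr _ _ _ hN
    rw [← Int.modEq_iff_dvd]
    have hbase : (PySem.Int.mod (base * base) N) ^ (n / 2) ≡ (base * base) ^ (n / 2) [ZMOD N] :=
      (pvModModEq (base * base) N).pow _
    have hsplit : (base : Int) ^ n = base ^ (n % 2) * (base * base) ^ (n / 2) := by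
      rw [← pow_two, ← pow_mul, ← pow_add]
      congr 1
      omega
    rcases Nat.mod_two_eq_zero_or_one n with hpar | hpar
    · rw [hmd, hpar]
      norm_num
      refine (Int.ModEq.symm ?_)
      calc c * (PySem.Int.mod (base * base) N) ^ (n / 2)
          ≡ c * (base * base) ^ (n / 2) [ZMOD N] := (Int.ModEq.refl c).mul hbase
        _ = c * base ^ n := by rw [hsplit, hpar]; ring
    · rw [hmd, hpar]
      norm_num
      refine (Int.ModEq.symm ?_)
      calc PySem.Int.mod (c * base) N * (PySem.Int.mod (base * base) N) ^ (n / 2)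
          ≡ (c * base) * (base * base) ^ (n / 2) [ZMOD N] :=
            Int.ModEq.mul (pvModModEq (c * base) N) hbase
        _ = c * base ^ n := by rw [hsplit, hpar]; ring

-- Per-character agreement of the two encryptions.
theorem pvBinPow_char (N e i : Int) (hN : N ≠ 0) (he : 2 ≤ e) :
    pvBinPow N 1 (PySem.Int.mod i N) e = PySem.Int.powMod i e.toNat N := by
  have hcast : ((e.toNat : Nat) : Int) = e := by omega
  have hn : 1 ≤ e.toNat := by omega
  rw [← hcast, pvBinPow_eq N hN e.toNat hn 1 (PySem.Int.mod i N)]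
  simp only [one_mul, PySem.Int.powMod]
  apply pvModCongr _ _ _ hN
  rw [← Int.modEq_iff_dvd]
  exact ((pvModModEq i N).pow _).symm

-- ===== VERDICT (by name: the statement is the Claim_ definition above) =====
theorem criptografa_spec : Claim_equal_criptografa := by
  intro frase p q _hdom hpre
  obtain ⟨hp1, hq1, hor⟩ := hpre
  unfold Spec_criptografa criptografa criptografa_alt
  simp only [funcaoTotiente, multiplicaInverso, primos_entre_si, List.map_map]
  have hphi : (p - 1) * (q - 1) ≠ 0 := mul_ne_zero (by omega) (by omega)
  set phi := (p - 1) * (q - 1) with hphidef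
  set e := pvGcdLoop (phi.natAbs + 2) 2 phi with hedef
  have he2 : 2 ≤ e := pvGcdLoop_ge _ 2 phi
  have hcop : Int.gcd e phi = 1 := pvE_coprime phi hphi
  refine Prod.ext ?_ (Prod.ext rfl ?_)
  · rcases hor with hf | hN0
    · subst hf
      rfl
    · apply List.map_congr_left
      intro ch _
      simp only [Function.comp]
      exact (pvBinPow_char (p * q) e (ch.toNat : Int) hN0 he2).symm
  · exact pvInverse_unique e phi (pvExtendedGcd e phi).2.1 _ hcop
      (pvA_inverse e phi he2 hcop) (pvB_inverse e phi hcop) hphi
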